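-- pv_equiv track=rewrite | github.com/GINK03/atcoder-solvers | abc121_d.py | calc
-- ===== SOURCE A (Python) =====
-- def calc(x):
--     if x%2 == 0:
--         return calc(x+1) ^ (x+1)
--     else:
--         if ((x+1)//2)%2 == 0:
--             return 0
--         else:
--             return 1
-- ===== SOURCE B (Python) =====
-- def calc(x):
--     r = x % 4
--     if r == 0:
--         return x
--     elif r == 1:
--         return 1
--     elif r == 2:
--         return x + 1
--     else:
--         return 0
-- ===== Notes on version B (the rewrite author's own statement) =====
-- stated objective: simpler
-- what changed: Replaces A's recurse-on-even-then-parity-case formulation with a single non-recursive dispatch on x % 4 using the closed form for XOR(0..x).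
import Mathlib
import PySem

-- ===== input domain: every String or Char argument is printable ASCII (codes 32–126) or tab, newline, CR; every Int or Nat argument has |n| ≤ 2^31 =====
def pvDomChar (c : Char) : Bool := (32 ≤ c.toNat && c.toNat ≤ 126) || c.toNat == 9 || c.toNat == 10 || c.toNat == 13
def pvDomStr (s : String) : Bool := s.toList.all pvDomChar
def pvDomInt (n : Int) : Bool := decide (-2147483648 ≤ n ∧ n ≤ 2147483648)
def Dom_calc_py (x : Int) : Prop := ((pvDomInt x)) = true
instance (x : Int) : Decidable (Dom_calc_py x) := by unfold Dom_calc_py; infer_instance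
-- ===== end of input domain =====

-- B replaces A's recurse-on-even formulation by a single non-recursive dispatch on x % 4 (objective: simpler).

-- ===== PORT A =====
-- termination: an even x makes exactly one recursive call on the odd x+1
def calc_py (x : Int) : Int :=
  if PySem.Int.mod x 2 = 0 then
    PySem.Int.bxor (calc_py (x + 1)) (x + 1)
  else
    if PySem.Int.mod (PySem.Int.floordiv (x + 1) 2) 2 = 0 then 0 else 1
termination_by (if PySem.Int.mod x 2 = 0 then 1 else 0)
decreasing_by
  simp_all [PySem.Int.mod, Int.fmod_eq_emod]
  omega

-- ===== PORT B =====
def calc_py_alt (x : Int) : Int :=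
  let r := PySem.Int.mod x 4
  if r = 0 then x
  else if r = 1 then 1
  else if r = 2 then x + 1
  else 0

-- ===== PRECONDITION & SPEC =====
def Spec_calc_py (x : Int) (out : Int) : Prop := out = calc_py_alt x
instance (x : Int) (out : Int) : Decidable (Spec_calc_py x out) := by unfold Spec_calc_py; infer_instance

-- ===== CLAIM (what is proved, stated in full; the proofs are below) =====
def Claim_equal_calc_py : Prop := ∀ (x : Int), Dom_calc_py x → Spec_calc_py x (calc_py x)

-- ===== LEMMAS AND PROOFS =====
theorem pymod2 (a : Int) : PySem.Int.mod a 2 = a % 2 := by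
  simp [PySem.Int.mod, Int.fmod_eq_emod]

theorem pymod4 (a : Int) : PySem.Int.mod a 4 = a % 4 := by
  simp [PySem.Int.mod, Int.fmod_eq_emod]

theorem pydiv2 (a : Int) : PySem.Int.floordiv a 2 = a / 2 := by
  simp [PySem.Int.floordiv, Int.fdiv_eq_ediv_of_nonneg _ (by norm_num : (0:Int) ≤ 2)]

theorem nat_xor_one_odd (m : Nat) : 1 ^^^ (2*m+1) = 2*m := by
  rw [show 2*m+1 = Nat.bit true m by simp [Nat.bit],
      show (1:Nat) = Nat.bit true 0 from rfl, Nat.xor_bit]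
  simp [Nat.bit]

theorem nat_xor_one_even (m : Nat) : 1 ^^^ (2*m) = 2*m+1 := by
  rw [show 2*m = Nat.bit false m by simp [Nat.bit],
      show (1:Nat) = Nat.bit true 0 from rfl, Nat.xor_bit]
  simp [Nat.bit]

theorem bxor_one_odd (k : Int) : PySem.Int.bxor 1 (2*k+1) = 2*k := by
  simp only [PySem.Int.bxor, Int.toNat_one]
  split_ifs with h h2 h3
  · have e : (2*k+1).toNat = 2*k.toNat+1 := by omega
    rw [e, nat_xor_one_odd]
    push_cast
    omega
  · have e : (-(2 * k + 1) - 1).toNat = 2*(-1-k).toNat := by omega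
    rw [e, nat_xor_one_even]
    push_cast
    omega
  · omega
  · omega

theorem bxor_zero_left (b : Int) : PySem.Int.bxor 0 b = b := by
  rw [PySem.Int.bxor_comm, PySem.Int.bxor_zero]

-- calc_py on an odd argument, computed
theorem calc_py_odd (x : Int) (hx : x % 2 = 1) :
    calc_py x = if (x + 1) / 2 % 2 = 0 then 0 else 1 := by
  rw [calc_py, pymod2, pymod2, pydiv2]
  simp [hx]

theorem calc_py_eq_alt (x : Int) : calc_py x = calc_py_alt x := by
  unfold calc_py_alt
  rw [pymod4]
  rcases (by omega : x % 4 = 0 ∨ x % 4 = 1 ∨ x % 4 = 2 ∨ x % 4 = 3) with h | h | h | h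
  · obtain ⟨k, rfl⟩ : ∃ k, x = 4 * k := ⟨x / 4, by omega⟩
    have hA : calc_py (4 * k) = 2 * (2 * k) := by
      rw [calc_py, pymod2, if_pos (by omega : (4*k) % 2 = 0),
          calc_py_odd _ (by omega), if_neg (by omega : ¬ ((4*k+1+1)/2 % 2 = 0)),
          show (4:Int) * k + 1 = 2 * (2 * k) + 1 by ring, bxor_one_odd]
    rw [hA, if_pos h]
    ring
  · rw [calc_py_odd _ (by omega), if_neg (by omega : ¬ ((x+1)/2 % 2 = 0))]
    simp [h]
  · obtain ⟨k, rfl⟩ : ∃ k, x = 4 * k + 2 := ⟨x / 4, by omega⟩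
    have hA : calc_py (4 * k + 2) = 4 * k + 2 + 1 := by
      rw [calc_py, pymod2, if_pos (by omega : (4*k+2) % 2 = 0),
          calc_py_odd _ (by omega), if_pos (by omega : (4*k+2+1+1)/2 % 2 = 0),
          bxor_zero_left]
    rw [hA, if_neg (by omega), if_neg (by omega), if_pos (by omega : (4*k+2) % 4 = 2)]
  · rw [calc_py_odd _ (by omega), if_pos (by omega : (x+1)/2 % 2 = 0)]
    simp [h]

-- ===== VERDICT (by name: the statement is the Claim_ definition above) =====
theorem calc_py_spec : Claim_equal_calc_py := by
  intro x _
  unfold Spec_calc_py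
  exact calc_py_eq_alt x
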